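-- pv_equiv track=rewrite | github.com/QuentinDeHaes/GameBot | GameBot.py | getAllgamesList
-- ===== SOURCE A (Python) =====
-- def getAllgamesList(list):
--     string =""
--     currentgame = ""
--     for x in list:
--         if x[0]==currentgame:
--             string += " -" + x[1]
--         else:
--             string+= "\n"+ x[0]
--             string += " -" + x[1]
--             currentgame=x[0]
--
--     return string
-- ===== SOURCE B (Python) =====
-- def getAllgamesList(list):
--     pieces = []
--     i = 0
--     n = len(list)
--     while i < n:
--         key = list[i][0]
--         pieces.append("\n" + key)
--         while i < n and list[i][0] == key:
--             pieces.append(" -" + list[i][1])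
--             i += 1
--     return "".join(pieces)
-- ===== Notes on version B (the rewrite author's own statement) =====
-- stated objective: simpler
-- what changed: Replaces the element-at-a-time loop threading a currentgame sentinel through string concatenations with stateless nested index loops: an outer loop per maximal run of equal keys that always emits the run's header, an inner loop for the run's items, pieces collected and joined once.
-- intended difference: On non-empty inputs whose first element's game key is the empty string, A omits that first run's header line (a leftover of its currentgame='' sentinel) while B emits the '\n'+key header for every run, which is the intended uniform formatting. — e.g. on getAllgamesList([("", "a")]): A returns " -a", B returns "\n -a"
import Mathlib
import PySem

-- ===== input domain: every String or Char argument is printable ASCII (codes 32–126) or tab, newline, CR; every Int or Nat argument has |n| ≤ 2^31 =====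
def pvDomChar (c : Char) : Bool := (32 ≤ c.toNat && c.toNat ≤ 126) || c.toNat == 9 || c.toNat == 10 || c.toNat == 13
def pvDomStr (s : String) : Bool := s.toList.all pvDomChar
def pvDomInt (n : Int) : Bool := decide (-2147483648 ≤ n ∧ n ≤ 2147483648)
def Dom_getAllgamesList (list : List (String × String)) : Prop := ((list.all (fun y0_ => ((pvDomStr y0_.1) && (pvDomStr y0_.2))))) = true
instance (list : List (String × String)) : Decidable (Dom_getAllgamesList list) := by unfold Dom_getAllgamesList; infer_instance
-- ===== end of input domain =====

-- B formats each maximal run of equal keys with nested index loops, always emitting the run's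
-- header (objective: simpler); it differs from A exactly where A's "" sentinel drops a header (D_ below).

-- ===== PORT A =====
-- literal port of A: one fold over the elements with state (string, currentgame)
def getAllgamesList (list : List (String × String)) : String :=
  (list.foldl (fun (st : String × String) x =>
      if x.1 == st.2 then (st.1 ++ (" -" ++ x.2), st.2)
      else ((st.1 ++ ("\n" ++ x.1)) ++ (" -" ++ x.2), x.1)) ("", "")).1

-- ===== PORT B =====
-- outer while: one step per maximal run (header piece, then the run's item pieces);
-- the inner while over indices with the same key is the takeWhile/dropWhile split
def altPieces : List (String × String) → List String
  | [] => []
  | x :: xs =>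
      ("\n" ++ x.1) ::
        ((x :: xs.takeWhile (fun y => y.1 == x.1)).map (fun y => " -" ++ y.2)
          ++ altPieces (xs.dropWhile (fun y => y.1 == x.1)))
termination_by l => l.length
decreasing_by
  simp only [List.length_cons]
  exact Nat.lt_succ_of_le (List.length_dropWhile_le _ _)

def getAllgamesList_alt (list : List (String × String)) : String :=
  String.join (altPieces list)

-- ===== PRECONDITION & SPEC =====
-- On non-empty inputs whose first element's game key is the empty string, A omits that first
-- run's header line (a leftover of its currentgame="" sentinel) while B emits the "\n"+key
-- header for every run, which is the intended uniform formatting.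
def D_getAllgamesList (list : List (String × String)) : Prop :=
  list.head?.map Prod.fst = some ""
instance (list : List (String × String)) : Decidable (D_getAllgamesList list) := by unfold D_getAllgamesList; infer_instance

def Spec_getAllgamesList (list : List (String × String)) (out : String) : Prop :=
  ¬ D_getAllgamesList list → out = getAllgamesList_alt list
instance (list : List (String × String)) (out : String) : Decidable (Spec_getAllgamesList list out) := by unfold Spec_getAllgamesList; infer_instance

def pvDiffWitness_getAllgamesList : (List (String × String)) := [("", "a")]
def pvDiffWitnessOut_getAllgamesList : String × String := (" -a", "\n -a")

-- ===== CLAIM (what is proved, stated in full; the proofs are below) =====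
def Claim_unchanged_getAllgamesList : Prop := ∀ (list : List (String × String)), Dom_getAllgamesList list → Spec_getAllgamesList list (getAllgamesList list)
def Claim_changed_getAllgamesList : Prop := Dom_getAllgamesList (pvDiffWitness_getAllgamesList) ∧ D_getAllgamesList (pvDiffWitness_getAllgamesList) ∧ getAllgamesList (pvDiffWitness_getAllgamesList) = pvDiffWitnessOut_getAllgamesList.1 ∧ getAllgamesList_alt (pvDiffWitness_getAllgamesList) = pvDiffWitnessOut_getAllgamesList.2 ∧ pvDiffWitnessOut_getAllgamesList.1 ≠ pvDiffWitnessOut_getAllgamesList.2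
def Claim_exact_getAllgamesList : Prop := ∀ (list : List (String × String)), Dom_getAllgamesList list → D_getAllgamesList list → getAllgamesList list ≠ getAllgamesList_alt list

-- ===== LEMMAS AND PROOFS =====

-- A's loop body, named for the proofs
def fA (st : String × String) (x : String × String) : String × String :=
  if x.1 == st.2 then (st.1 ++ (" -" ++ x.2), st.2)
  else ((st.1 ++ ("\n" ++ x.1)) ++ (" -" ++ x.2), x.1)

-- the maximal runs of equal keys (proof-side view of both programs)
def runsOf : List (String × String) → List (String × List (String × String))
  | [] => []
  | x :: xs =>
    (x.1, x :: xs.takeWhile (fun y => y.1 == x.1)) :: runsOf (xs.dropWhile (fun y => y.1 == x.1))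
termination_by l => l.length
decreasing_by
  simp only [List.length_cons]
  exact Nat.lt_succ_of_le (List.length_dropWhile_le _ _)

-- text A produces from a run list, given the previous key
def g : List (String × List (String × String)) → String → String
  | [], _ => ""
  | r :: rs, prev =>
    let run := String.join (r.2.map (fun x => " -" ++ x.2))
    if r.1 != prev then ("\n" ++ r.1) ++ (run ++ g rs r.1) else run ++ g rs prev

theorem join_foldl (l : List String) (s : String) : l.foldl (· ++ ·) s = s ++ String.join l := by
  induction l generalizing s with
  | nil => simp [String.join]
  | cons a t ih => simp [String.join, List.foldl_cons] at *; rw [ih, ih a]; simp [String.append_assoc]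

theorem join_append (a b : List String) : String.join (a ++ b) = String.join a ++ String.join b := by
  simp [String.join, List.foldl_append]; rw [join_foldl]; rfl

theorem join_cons (a : String) (l : List String) : String.join (a :: l) = a ++ String.join l := by
  have : a :: l = [a] ++ l := rfl
  rw [this, join_append]
  have ha : String.join [a] = a := by
    show String.join [a] = a
    simp [String.join]
  rw [ha]

-- A's fold over a run whose keys all equal the current game: no headers, key unchanged
theorem foldA_run (run : List (String × String)) (s cg : String)
    (h : ∀ y ∈ run, y.1 = cg) :
    run.foldl fA (s, cg) = (s ++ String.join (run.map (fun x => " -" ++ x.2)), cg) := by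
  induction run generalizing s with
  | nil => simp [String.join]
  | cons y t ih =>
    have hy : y.1 = cg := h y (by simp)
    simp only [List.foldl_cons, fA, hy, beq_self_eq_true, if_true]
    rw [ih _ (fun z hz => h z (by simp [hz])), List.map_cons, join_cons]
    simp [String.append_assoc]

theorem foldA_eq (l : List (String × String)) (acc cg : String) :
    (l.foldl fA (acc, cg)).1 = acc ++ g (runsOf l) cg := by
  match l with
  | [] => simp [runsOf, g]
  | x :: xs =>
    rw [runsOf]
    have hsplit : x :: xs = (x :: xs.takeWhile (fun y => y.1 == x.1)) ++ xs.dropWhile (fun y => y.1 == x.1) := by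
      simp [List.takeWhile_append_dropWhile]
    have hmem : ∀ y ∈ xs.takeWhile (fun y => y.1 == x.1), y.1 = x.1 := by
      intro y hy
      have := List.mem_takeWhile_imp hy
      simpa using this
    rw [hsplit, List.foldl_append]
    by_cases hcg : x.1 = cg
    · have hrun : (x :: xs.takeWhile (fun y => y.1 == x.1)).foldl fA (acc, cg)
          = (acc ++ String.join ((x :: xs.takeWhile (fun y => y.1 == x.1)).map (fun z => " -" ++ z.2)), cg) := by
        apply foldA_run
        intro y hy
        rcases List.mem_cons.mp hy with rfl | hmem'
        · exact hcg
        · rw [hmem y hmem']; exact hcg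
      rw [hrun, foldA_eq (xs.dropWhile (fun y => y.1 == x.1))]
      simp [g, hcg, String.append_assoc]
    · have hbeq : (x.1 == cg) = false := by simp [hcg]
      have step : fA (acc, cg) x = ((acc ++ ("\n" ++ x.1)) ++ (" -" ++ x.2), x.1) := by
        simp [fA, hbeq]
      have hrun : (xs.takeWhile (fun y => y.1 == x.1)).foldl fA
            ((acc ++ ("\n" ++ x.1)) ++ (" -" ++ x.2), x.1)
          = (((acc ++ ("\n" ++ x.1)) ++ (" -" ++ x.2)) ++ String.join ((xs.takeWhile (fun y => y.1 == x.1)).map (fun z => " -" ++ z.2)), x.1) :=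
        foldA_run _ _ _ hmem
      simp only [List.foldl_cons, step]
      rw [hrun, foldA_eq (xs.dropWhile (fun y => y.1 == x.1))]
      have hne : (x.1 != cg) = true := by simp [hcg]
      simp only [g, hne, if_pos]
      rw [List.map_cons, join_cons]
      simp [String.append_assoc]
termination_by l.length
decreasing_by
  all_goals simp only [List.length_cons]
  all_goals exact Nat.lt_succ_of_le (List.length_dropWhile_le _ _)

-- head of dropWhile fails the predicate
theorem head_dropWhile_false {α : Type} (p : α → Bool) (l : List α) (y : α)
    (h : (l.dropWhile p).head? = some y) : p y = false := by
  induction l with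
  | nil => simp [List.dropWhile] at h
  | cons a t ih =>
    rw [List.dropWhile_cons] at h
    split at h
    · exact ih h
    · next hp => simp at h; subst h; simpa using hp

-- when the first key differs from prev, A's run text equals B's pieces joined
theorem g_eq_alt (l : List (String × String)) (prev : String)
    (h : ∀ y, l.head? = some y → y.1 ≠ prev) :
    g (runsOf l) prev = String.join (altPieces l) := by
  match l with
  | [] => simp [runsOf, altPieces, g, String.join]
  | x :: xs =>
    have hx : x.1 ≠ prev := h x (by simp)
    have hne : (x.1 != prev) = true := by simpa using hx
    rw [runsOf, altPieces]
    simp only [g, hne, if_pos]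
    rw [join_cons, join_append]
    have hrec : g (runsOf (xs.dropWhile (fun y => y.1 == x.1))) x.1
        = String.join (altPieces (xs.dropWhile (fun y => y.1 == x.1))) := by
      apply g_eq_alt
      intro y hy
      have := head_dropWhile_false _ _ _ hy
      simpa using this
    rw [hrec]
termination_by l.length
decreasing_by
  simp only [List.length_cons]
  exact Nat.lt_succ_of_le (List.length_dropWhile_le _ _)

-- inside D_: B's output is "\n" followed by A's output
theorem alt_eq_newline_A (x : String × String) (xs : List (String × String)) (hx : x.1 = "") :
    getAllgamesList_alt (x :: xs) = "\n" ++ getAllgamesList (x :: xs) := by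
  have hA : getAllgamesList (x :: xs) = g (runsOf (x :: xs)) "" := by
    have h0 : getAllgamesList (x :: xs) = ((x :: xs).foldl fA ("", "")).1 := rfl
    rw [h0, foldA_eq]
    simp
  have hg : g (runsOf (x :: xs)) ""
      = String.join ((x :: xs.takeWhile (fun y => y.1 == x.1)).map (fun z => " -" ++ z.2))
        ++ g (runsOf (xs.dropWhile (fun y => y.1 == x.1))) "" := by
    rw [runsOf]
    simp [g, hx]
  have hrec : g (runsOf (xs.dropWhile (fun y => y.1 == x.1))) ""
      = String.join (altPieces (xs.dropWhile (fun y => y.1 == x.1))) := by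
    apply g_eq_alt
    intro y hy
    have := head_dropWhile_false _ _ _ hy
    intro hcon
    rw [hcon, hx] at this
    simp at this
  have hB : getAllgamesList_alt (x :: xs)
      = ("\n" ++ x.1) ++ (String.join ((x :: xs.takeWhile (fun y => y.1 == x.1)).map (fun z => " -" ++ z.2))
          ++ String.join (altPieces (xs.dropWhile (fun y => y.1 == x.1)))) := by
    rw [getAllgamesList_alt, altPieces, join_cons, join_append]
  rw [hB, hA, hg, hrec, hx]
  simp

-- ===== VERDICT (by name: the statements are the Claim_ definitions above) =====
theorem getAllgamesList_spec : Claim_unchanged_getAllgamesList := by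
  intro l _ hD
  have hA : getAllgamesList l = g (runsOf l) "" := by
    have h0 : getAllgamesList l = (l.foldl fA ("", "")).1 := rfl
    rw [h0, foldA_eq]
    simp
  rw [hA, getAllgamesList_alt]
  apply g_eq_alt
  intro y hy hcon
  apply hD
  unfold D_getAllgamesList
  rw [hy]
  simp [hcon]

theorem getAllgamesList_changed : Claim_changed_getAllgamesList := by
  unfold Claim_changed_getAllgamesList
  refine ⟨by decide, by decide, ?_, ?_, by decide⟩
  · decide
  · show String.join (altPieces [("", "a")]) = "\n -a"
    rw [altPieces]
    simp only [List.takeWhile_nil, List.dropWhile_nil]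
    rw [altPieces]
    decide

theorem getAllgamesList_tight : Claim_exact_getAllgamesList := by
  intro l _ hD hEq
  unfold D_getAllgamesList at hD
  match l with
  | [] => simp at hD
  | x :: xs =>
    have hx : x.1 = "" := by simpa using hD
    have h := alt_eq_newline_A x xs hx
    rw [← hEq] at h
    have hlen : (getAllgamesList (x :: xs)).length = ("\n" ++ getAllgamesList (x :: xs)).length := by rw [← h]
    simp [String.length_append] at hlen
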